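-- pv_equiv track=rewrite | github.com/igorxxl8/MMOD | Labs/lab2/system_stat_research.py | me_disc
-- ===== SOURCE A (Python) =====
-- def me_disc(matrix, is_for_x):
--     m = 0
--
--     for i in range(len(matrix)):
--         for j in range(len(matrix[0])):
--             if is_for_x:
--                 m += matrix[i][j] * i
--             else:
--                 m += matrix[i][j] * j
--
--     return m
-- ===== SOURCE B (Python) =====
-- def me_disc(matrix, is_for_x):
--     # Multiplication-free suffix-sum scheme: sum(i * s_i) == sum over k>=1 of
--     # (suffix sum s_k + s_{k+1} + ...), accumulated by a back-to-front scan.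
--     if not matrix:
--         return 0
--     cols = len(matrix[0])
--     m = 0
--     if is_for_x:
--         running = 0
--         for i in range(len(matrix) - 1, 0, -1):
--             running += sum(matrix[i][:cols])
--             m += running
--     else:
--         for row in matrix:
--             running = 0
--             for j in range(cols - 1, 0, -1):
--                 running += row[j]
--                 m += running
--     return m
-- ===== Notes on version B (the rewrite author's own statement) =====
-- stated objective: alternative
-- what changed: Replaces the per-element index multiplications of A's double loop with a multiplication-free suffix-sum scheme: sum(i*s_i) = sum of suffix sums, so the x branch scans rows back-to-front accumulating a running suffix of row sums, and the y branch scans each row right-to-left accumulating running suffix sums of its entries.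
import Mathlib
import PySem

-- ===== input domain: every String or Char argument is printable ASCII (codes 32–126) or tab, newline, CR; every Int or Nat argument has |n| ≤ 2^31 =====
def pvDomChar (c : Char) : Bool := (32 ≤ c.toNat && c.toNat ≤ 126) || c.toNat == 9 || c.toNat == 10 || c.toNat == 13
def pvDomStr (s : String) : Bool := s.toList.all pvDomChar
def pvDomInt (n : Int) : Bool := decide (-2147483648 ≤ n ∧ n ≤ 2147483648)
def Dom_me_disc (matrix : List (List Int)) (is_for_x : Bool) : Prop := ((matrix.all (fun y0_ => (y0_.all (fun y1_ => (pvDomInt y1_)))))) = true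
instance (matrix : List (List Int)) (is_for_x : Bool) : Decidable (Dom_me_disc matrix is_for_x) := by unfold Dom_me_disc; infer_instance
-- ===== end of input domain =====

-- B computes the same weighted sum without any multiplication, by accumulating running suffix
-- sums in back-to-front scans (Σ i·sᵢ = Σ of suffix sums); objective: alternative algorithm, same cost.

-- ===== PORT A =====
def me_disc (matrix : List (List Int)) (is_for_x : Bool) : Int :=
  (PySem.List.pyRange 0 matrix.length 1).foldl (fun m i =>
    (PySem.List.pyRange 0 (PySem.List.pyGetD matrix 0 []).length 1).foldl (fun m j =>
      if is_for_x then m + (PySem.List.pyGetD (PySem.List.pyGetD matrix i []) j 0) * i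
      else m + (PySem.List.pyGetD (PySem.List.pyGetD matrix i []) j 0) * j) m) 0

-- ===== PORT B =====
def me_disc_alt (matrix : List (List Int)) (is_for_x : Bool) : Int :=
  if matrix = [] then 0
  else
    let cols := (matrix.headD []).length
    if is_for_x then
      ((PySem.List.pyRange ((matrix.length : Int) - 1) 0 (-1)).foldl
        (fun s i => (s.1 + ((PySem.List.pyGetD matrix i []).take cols).sum,
                     s.2 + (s.1 + ((PySem.List.pyGetD matrix i []).take cols).sum)))
        ((0 : Int), (0 : Int))).2
    else
      matrix.foldl (fun m row =>
        ((PySem.List.pyRange ((cols : Int) - 1) 0 (-1)).foldl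
          (fun s j => (s.1 + PySem.List.pyGetD row j 0,
                       s.2 + (s.1 + PySem.List.pyGetD row j 0)))
          ((0 : Int), m)).2) 0

-- ===== PRECONDITION & SPEC =====
-- Pre_ excludes exactly the inputs on which A raises IndexError: a row shorter than len(matrix[0]).
def Pre_me_disc (matrix : List (List Int)) (is_for_x : Bool) : Prop :=
  ∀ row ∈ matrix, (matrix.headD []).length ≤ row.length
instance (matrix : List (List Int)) (is_for_x : Bool) : Decidable (Pre_me_disc matrix is_for_x) := by unfold Pre_me_disc; infer_instance

def pvWitness_me_disc : List (List Int) × Bool := ([[1, 2], [3, 4]], true)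

def Spec_me_disc (matrix : List (List Int)) (is_for_x : Bool) (out : Int) : Prop := out = me_disc_alt matrix is_for_x
instance (matrix : List (List Int)) (is_for_x : Bool) (out : Int) : Decidable (Spec_me_disc matrix is_for_x out) := by unfold Spec_me_disc; infer_instance

-- ===== CLAIM (what is proved, stated in full; the proofs are below) =====
def Claim_equal_me_disc : Prop := ∀ (matrix : List (List Int)) (is_for_x : Bool), Dom_me_disc matrix is_for_x → Pre_me_disc matrix is_for_x → Spec_me_disc matrix is_for_x (me_disc matrix is_for_x)

-- ===== LEMMAS AND PROOFS =====

-- the canonical double-index sum both ports are reduced to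
def pvS (matrix : List (List Int)) (is_for_x : Bool) : Int :=
  ∑ i ∈ Finset.range matrix.length, ∑ j ∈ Finset.range (matrix.headD []).length,
    (if is_for_x then ((matrix.getD i []).getD j 0) * i else ((matrix.getD i []).getD j 0) * j)

theorem headD_getD (matrix : List (List Int)) : matrix.headD [] = matrix.getD 0 [] := by
  cases matrix <;> rfl

theorem sum_map_range (n : Nat) (f : Nat → Int) :
    ((List.range n).map f).sum = ∑ i ∈ Finset.range n, f i := rfl

theorem me_disc_eq_pvS (matrix : List (List Int)) (is_for_x : Bool) :
    me_disc matrix is_for_x = pvS matrix is_for_x := by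
  unfold me_disc pvS
  rw [PySem.List.pyGetD_zero, ← headD_getD]
  cases is_for_x <;>
  · simp only [Bool.false_eq_true, if_false, if_true,
      PySem.List.pyRange_zero_nat, List.foldl_map, PySem.List.foldl_add,
      PySem.List.pyGetD_natCast, zero_add]
    rw [sum_map_range]
    refine Finset.sum_congr rfl (fun i _ => ?_)
    rw [sum_map_range]

-- the countdown suffix-accumulation fold equals the index-weighted sum
theorem revfold (g : Int → Int) : ∀ (n : Nat) (r0 m0 : Int),
    ((PySem.List.pyRange (n : Int) 0 (-1)).foldl
      (fun s i => (s.1 + g i, s.2 + (s.1 + g i))) (r0, m0)).2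
      = m0 + n * r0 + ∑ i ∈ Finset.range (n + 1), (i : Int) * g i := by
  intro n
  induction n with
  | zero =>
      intro r0 m0
      rw [PySem.List.pyRange_neg_one_eq_nil (by norm_num)]
      simp
  | succ n ih =>
      intro r0 m0
      rw [show ((n + 1 : Nat) : Int) = (n : Int) + 1 by push_cast; ring,
        PySem.List.pyRange_neg_one_cons (by positivity), List.foldl_cons,
        show (n : Int) + 1 - 1 = (n : Int) by ring, ih,
        Finset.sum_range_succ (n := n + 1)]
      push_cast
      ring

theorem take_sum (row : List Int) : ∀ (c : Nat), c ≤ row.length →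
    (row.take c).sum = ∑ j ∈ Finset.range c, row.getD j 0 := by
  intro c
  induction c with
  | zero => simp
  | succ n ih =>
      intro h
      rw [Finset.sum_range_succ, ← ih (by omega), List.getD_eq_getElem _ _ (by omega)]
      exact List.sum_take_succ row n (by omega)

theorem pv_foldl_ext {α β : Type} (f g : β → α → β) (h : ∀ acc x, f acc x = g acc x) :
    ∀ (l : List α) (init : β), l.foldl f init = l.foldl g init := by
  intro l
  induction l with
  | nil => intro init; rfl
  | cons a t ih => intro init; rw [List.foldl_cons, List.foldl_cons, h, ih]

theorem sum_map_getD (xs : List (List Int)) (h : List Int → Int) :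
    (xs.map h).sum = ∑ i ∈ Finset.range xs.length, h (xs.getD i []) := by
  induction xs with
  | nil => simp
  | cons x t ih =>
      rw [List.map_cons, List.sum_cons, ih, List.length_cons, Finset.sum_range_succ']
      simp [add_comm]

theorem me_disc_alt_eq_pvS (matrix : List (List Int)) (is_for_x : Bool)
    (hpre : Pre_me_disc matrix is_for_x) :
    me_disc_alt matrix is_for_x = pvS matrix is_for_x := by
  unfold Pre_me_disc at hpre
  by_cases hm : matrix = []
  · subst hm; cases is_for_x <;> simp [me_disc_alt, pvS]
  · rw [me_disc_alt, if_neg hm]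
    set cols := (matrix.headD []).length with hcols
    have hmemD : ∀ i ∈ Finset.range matrix.length, matrix.getD i [] ∈ matrix := by
      intro i hi
      rw [List.getD_eq_getElem _ _ (Finset.mem_range.1 hi)]
      exact List.getElem_mem _
    have hn : matrix.length - 1 + 1 = matrix.length := by
      rcases matrix with _ | _
      · exact absurd rfl hm
      · simp
    cases is_for_x
    · -- y branch: per-row right-to-left suffix accumulation
      simp only [Bool.false_eq_true, if_false]
      by_cases hc : cols = 0
      · have h1 : PySem.List.pyRange ((cols : Int) - 1) 0 (-1) = [] :=
          PySem.List.pyRange_neg_one_eq_nil (by omega)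
        rw [pvS]
        simp only [← hcols, hc, Finset.range_zero, Finset.sum_empty, Finset.sum_const_zero]
        exact List.foldl_fixed matrix
      · have hc1 : ((cols : Int) - 1) = ((cols - 1 : Nat) : Int) := by omega
        have hfold : ∀ (row : List Int) (m : Int),
            ((PySem.List.pyRange ((cols : Int) - 1) 0 (-1)).foldl
              (fun s j => (s.1 + PySem.List.pyGetD row j 0,
                           s.2 + (s.1 + PySem.List.pyGetD row j 0)))
              ((0 : Int), m)).2
            = m + ∑ j ∈ Finset.range cols, (j : Int) * row.getD j 0 := by
          intro row m
          rw [hc1, revfold (fun j => PySem.List.pyGetD row j 0) (cols - 1) 0 m,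
            show cols - 1 + 1 = cols by omega]
          rw [mul_zero, add_zero]
          refine congrArg _ (Finset.sum_congr rfl fun j hj => ?_)
          rw [PySem.List.pyGetD_natCast]
        have : matrix.foldl (fun m row =>
            ((PySem.List.pyRange ((cols : Int) - 1) 0 (-1)).foldl
              (fun s j => (s.1 + PySem.List.pyGetD row j 0,
                           s.2 + (s.1 + PySem.List.pyGetD row j 0)))
              ((0 : Int), m)).2) 0
            = matrix.foldl (fun m row => m + ∑ j ∈ Finset.range cols, (j : Int) * row.getD j 0) 0 := by
          exact pv_foldl_ext _ _ (fun m row => hfold row m) matrix 0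
        rw [this, PySem.List.foldl_add, zero_add, sum_map_getD, pvS]
        simp only [Bool.false_eq_true, if_false, ← hcols]
        refine Finset.sum_congr rfl fun i _ => Finset.sum_congr rfl fun j _ => ?_
        rw [mul_comm]
    · -- x branch: back-to-front running suffix of row sums
      simp only [if_true]
      have hc1 : ((matrix.length : Int) - 1) = ((matrix.length - 1 : Nat) : Int) := by
        rcases matrix with _ | _
        · exact absurd rfl hm
        · simp
      rw [hc1, revfold (fun i => ((PySem.List.pyGetD matrix i []).take cols).sum)
        (matrix.length - 1) 0 0, hn, mul_zero, add_zero, zero_add, pvS]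
      refine Finset.sum_congr rfl fun i hi => ?_
      rw [PySem.List.pyGetD_natCast,
        take_sum _ cols (hpre _ (hmemD i hi)), Finset.mul_sum]
      simp only [if_true, ← hcols]
      exact Finset.sum_congr rfl fun j _ => mul_comm _ _

-- ===== VERDICT (by name: the statement is the Claim_ definition above) =====
theorem me_disc_spec : Claim_equal_me_disc := by
  intro matrix is_for_x _ hpre
  unfold Spec_me_disc
  rw [me_disc_eq_pvS, me_disc_alt_eq_pvS matrix is_for_x hpre]
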